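-- pv_equiv track=rewrite | github.com/WhiteCrowZero/TargetPointer | scripts/pointer_runtime.py | parse_status_fields
-- ===== SOURCE A (Python) =====
-- def parse_status_fields(responses: list[str]) -> dict[str, str]:
--     for line in reversed(responses):
--         if not line.startswith("STATUS:"):
--             continue
--         fields: dict[str, str] = {}
--         for item in line[len("STATUS:") :].split(","):
--             if "=" not in item:
--                 continue
--             key, value = item.split("=", 1)
--             fields[key.strip().upper()] = value.strip()
--         return fields
--     return {}
-- ===== SOURCE B (Python) =====
-- def parse_status_fields(responses: list[str]) -> dict[str, str]:
--     fields: dict[str, str] = {}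
--     for line in responses:
--         if line.startswith("STATUS:"):
--             fields = {}
--             key, value, seen = [], [], False
--             for ch in line[len("STATUS:"):]:
--                 if ch == ",":
--                     if seen:
--                         fields["".join(key).strip().upper()] = "".join(value).strip()
--                     key, value, seen = [], [], False
--                 elif ch == "=" and not seen:
--                     seen = True
--                 elif seen:
--                     value.append(ch)
--                 else:
--                     key.append(ch)
--             if seen:
--                 fields["".join(key).strip().upper()] = "".join(value).strip()
--     return fields
-- ===== Notes on version B (the rewrite author's own statement) =====
-- stated objective: alternative
-- what changed: B replaces A's reverse scan with early return plus split(',')/split('=',1) parsing by a single forward pass that runs a character-level state machine (key/value buffers and a seen-'=' flag) over every STATUS line's payload, so the last STATUS line's dict naturally survives and no split or substring search is used.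
import Mathlib
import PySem

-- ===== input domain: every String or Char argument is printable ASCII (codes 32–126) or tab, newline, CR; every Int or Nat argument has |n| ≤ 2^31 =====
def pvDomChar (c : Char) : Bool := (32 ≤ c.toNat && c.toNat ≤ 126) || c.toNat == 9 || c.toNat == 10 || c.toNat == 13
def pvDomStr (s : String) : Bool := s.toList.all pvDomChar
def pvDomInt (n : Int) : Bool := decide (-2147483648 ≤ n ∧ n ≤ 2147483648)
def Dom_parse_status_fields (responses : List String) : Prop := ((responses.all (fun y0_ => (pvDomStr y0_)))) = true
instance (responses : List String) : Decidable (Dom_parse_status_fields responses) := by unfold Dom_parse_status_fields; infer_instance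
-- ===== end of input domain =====

-- B replaces A's reverse scan + split(',')/split('=',1) parsing by one forward pass
-- running a character-level state machine over every STATUS line's payload, the last
-- STATUS line's dict surviving (objective: alternative; same cost).

-- ===== PORT A =====
-- inner loop body: `if "=" not in item: continue; key, value = item.split("=", 1); fields[…] = …`
def pvStepA (d : PySem.Dict String String) (item : String) : PySem.Dict String String :=
  if PySem.Str.isIn "=" item then
    match PySem.Str.splitMax? item "=" 1 with
    | some [key, value] =>
        d.insert (PySem.Str.upper (PySem.Str.strip key)) (PySem.Str.strip value)
    | _ => d          -- unpacking `key, value = …` of any other shape would raise; guarded by the `in` test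
  else d

-- the body executed for the first STATUS line found by the reversed scan
def pvParseLineA (line : String) : List (String × String) :=
  match PySem.Str.split? (PySem.Str.slice line (some 7) none) "," with
  | some items => (items.foldl pvStepA PySem.Dict.empty).items
  | none => []      -- unreachable: the separator "," is nonempty

-- `for line in reversed(responses): … return fields` / final `return {}`
def pvScanA : List String → List (String × String)
  | [] => []
  | line :: rest =>
      if PySem.Str.startswith line "STATUS:" then pvParseLineA line
      else pvScanA rest

def parse_status_fields (responses : List String) : List (String × String) :=
  pvScanA responses.reverse

-- ===== PORT B =====
-- the two `if seen: fields[…] = …` commit sites of Source B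
def pvCommitB (d : PySem.Dict String String) (key value : List Char) (seen : Bool) :
    PySem.Dict String String :=
  if seen then
    d.insert (PySem.Str.upper (PySem.Str.strip (String.ofList key)))
             (PySem.Str.strip (String.ofList value))
  else d

-- Source B's inner `for ch in line[len("STATUS:"):]:` state machine, plus the final commit
def pvScanB : List Char → List Char → List Char → Bool → PySem.Dict String String →
    PySem.Dict String String
  | [], key, value, seen, d => pvCommitB d key value seen
  | c :: rest, key, value, seen, d =>
      if c = ',' then pvScanB rest [] [] false (pvCommitB d key value seen)
      else if c = '=' ∧ seen = false then pvScanB rest key value true d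
      else if seen then pvScanB rest key (value ++ [c]) seen d
      else pvScanB rest (key ++ [c]) value seen d

-- body of the `if line.startswith("STATUS:")` branch: fields = {}; run the machine
def pvParseLineB (line : String) : PySem.Dict String String :=
  pvScanB (PySem.Str.slice line (some 7) none).toList [] [] false PySem.Dict.empty

def parse_status_fields_alt (responses : List String) : List (String × String) :=
  (responses.foldl
    (fun fields line =>
      if PySem.Str.startswith line "STATUS:" then pvParseLineB line else fields)
    (PySem.Dict.empty : PySem.Dict String String)).items

-- ===== PRECONDITION & SPEC =====
def Spec_parse_status_fields (responses : List String) (out : List (String × String)) : Prop := out = parse_status_fields_alt responses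
instance (responses : List String) (out : List (String × String)) : Decidable (Spec_parse_status_fields responses out) := by unfold Spec_parse_status_fields; infer_instance

-- ===== CLAIM (what is proved, stated in full; the proofs are below) =====
def Claim_equal_parse_status_fields : Prop := ∀ (responses : List String), Dom_parse_status_fields responses → Spec_parse_status_fields responses (parse_status_fields responses)

-- ===== LEMMAS AND PROOFS =====

-- A's reversed scan with early return = find? on the reversed list
theorem pv_scanA_eq (ys : List String) :
    pvScanA ys = match ys.find? (fun line => PySem.Str.startswith line "STATUS:") with
      | some line => pvParseLineA line
      | none => [] := by
  induction ys with
  | nil => rfl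
  | cons y ys ih =>
      cases h : PySem.Str.startswith y "STATUS:" <;>
        simp only [PySem.Str.startswith] at h <;>
        simp at h <;> simp [pvScanA, List.find?, h, ih]

-- B's forward fold keeping the last STATUS line's dict = parse of the first match in reverse
theorem pv_foldl_lastB (xs : List String) (acc : PySem.Dict String String) :
    xs.foldl (fun fields line =>
        if PySem.Str.startswith line "STATUS:" then pvParseLineB line else fields) acc
      = match xs.reverse.find? (fun line => PySem.Str.startswith line "STATUS:") with
        | some t => pvParseLineB t
        | none => acc := by
  induction xs generalizing acc with
  | nil => simp
  | cons x xs ih =>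
      simp only [List.foldl_cons, ih, List.reverse_cons, List.find?_append]
      cases h : PySem.Str.startswith x "STATUS:" <;>
        cases hf : xs.reverse.find? (fun line => PySem.Str.startswith line "STATUS:") <;>
        simp only [PySem.Str.startswith] at h <;>
        simp at h <;> simp [List.find?, h]

-- split.go with maxsplit exhausted returns the rest as one piece
theorem pv_go_zero (fuel : Nat) (l : List Char) (acc : List (List Char)) :
    PySem.Chars.splitOnMax.go ['='] fuel 0 l [] acc = (l :: acc).reverse := by
  cases fuel <;> cases l <;> simp [PySem.Chars.splitOnMax.go]

-- split.go over pre ++ '=' :: suf with '=' ∉ pre and maxsplit 1 yields the two pieces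
theorem pv_go_sep (pre suf : List Char) (fuel : Nat) (cur : List Char) (acc : List (List Char))
    (hmem : '=' ∉ pre) (hfuel : pre.length + suf.length + 1 ≤ fuel) :
    PySem.Chars.splitOnMax.go ['='] fuel 1 (pre ++ '=' :: suf) cur acc
      = (suf :: (cur.reverse ++ pre) :: acc).reverse := by
  induction pre generalizing fuel cur with
  | nil =>
      cases fuel with
      | zero => omega
      | succ f =>
          have hp : List.isPrefixOf ['='] ('=' :: suf) = true := by simp [List.isPrefixOf]
          rw [List.nil_append, PySem.Chars.splitOnMax.go.eq_def]
          simp only [Nat.one_ne_zero, if_false, hp, if_true]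
          rw [pv_go_zero]; simp
  | cons c rest ih =>
      cases fuel with
      | zero => simp at hfuel
      | succ f =>
          have hc : c ≠ '=' := fun h => hmem (h ▸ List.mem_cons_self)
          have hp : List.isPrefixOf ['='] (c :: (rest ++ '=' :: suf)) = false := by
            simp [List.isPrefixOf, hc.symm]
          rw [List.cons_append, PySem.Chars.splitOnMax.go.eq_def]
          simp only [Nat.one_ne_zero, if_false, hp, Bool.false_eq_true]
          rw [ih f (c :: cur) (fun h => hmem (List.mem_cons_of_mem _ h)) (by simp at hfuel ⊢; omega)]
          simp

-- item.split("=", 1) at the first occurrence of '='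
theorem pv_splitMax_sep (l : List Char) (n : Nat)
    (hnth : l.drop n = '=' :: l.drop (n + 1)) (hmem : '=' ∉ l.take n) :
    PySem.Chars.splitMax? l ['='] 1 = some [l.take n, l.drop (n + 1)] := by
  have hl : l = l.take n ++ '=' :: l.drop (n + 1) := by
    conv_lhs => rw [← List.take_append_drop n l, hnth]
  unfold PySem.Chars.splitMax? PySem.Chars.splitOnMax
  rw [if_neg (by simp), if_neg (by norm_num)]
  have h1 : (1 : Int).toNat = 1 := rfl
  rw [h1]
  conv_lhs => rw [hl]
  rw [pv_go_sep _ _ _ _ _ hmem (by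
    simp only [List.length_take, List.length_drop, List.length_append, List.length_cons]
    omega)]
  simp

-- committing the buffered item = A's step on that item's characters
theorem pv_commit_eq (d : PySem.Dict String String) (key value : List Char) (seen : Bool)
    (hk : '=' ∉ key) :
    pvStepA d (String.ofList (if seen then key ++ '=' :: value else key))
      = pvCommitB d key value seen := by
  cases seen with
  | false =>
      have hin : PySem.Chars.isIn ['='] key = false := by
        rw [Bool.eq_false_iff, Ne, PySem.Chars.isIn_iff_infix, List.singleton_infix_iff]
        exact hk
      simp only [pvStepA, pvCommitB, PySem.Str.isIn, String.toList_ofList,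
        Bool.false_eq_true, if_false]
      rw [show ("=" : String).toList = ['='] from rfl, hin]
      simp
  | true =>
      have hin : PySem.Chars.isIn ['='] (key ++ '=' :: value) = true := by
        rw [PySem.Chars.isIn_iff_infix, List.singleton_infix_iff]
        simp
      have hdrop : (key ++ '=' :: value).drop key.length = '=' :: value := by simp
      have hdrop1 : (key ++ '=' :: value).drop (key.length + 1) = value := by
        rw [← List.drop_drop, hdrop]; rfl
      have htake : (key ++ '=' :: value).take key.length = key := by simp
      have hsplit : PySem.Str.splitMax? (String.ofList (key ++ '=' :: value)) "=" 1
          = some [String.ofList key, String.ofList value] := by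
        unfold PySem.Str.splitMax?
        rw [String.toList_ofList, show ("=" : String).toList = ['='] from rfl,
          pv_splitMax_sep (key ++ '=' :: value) key.length (by rw [hdrop, hdrop1])
            (by rw [htake]; exact hk)]
        rw [htake, hdrop1]; rfl
      simp only [pvStepA, pvCommitB, PySem.Str.isIn, String.toList_ofList, if_true]
      rw [show ("=" : String).toList = ['='] from rfl, hin]
      simp only [if_true]
      rw [hsplit]

-- splitOn.go's accumulator just prefixes the result
theorem pv_goOn_acc (fuel : Nat) (l cur : List Char) (acc : List (List Char)) :
    PySem.Chars.splitOn.go [','] fuel l cur acc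
      = acc.reverse ++ PySem.Chars.splitOn.go [','] fuel l cur [] := by
  induction fuel generalizing l cur acc with
  | zero => simp [PySem.Chars.splitOn.go]
  | succ f ih =>
      cases l with
      | nil => simp [PySem.Chars.splitOn.go]
      | cons c rest =>
          rw [PySem.Chars.splitOn.go, PySem.Chars.splitOn.go]
          split_ifs with hp
          · rw [ih _ _ (cur.reverse :: acc), ih _ _ [cur.reverse]]
            simp
          · exact ih _ _ acc

-- the state machine = A's fold over splitOn.go's items
theorem pv_scanB_eq (fuel : Nat) (l key value : List Char) (seen : Bool)
    (d : PySem.Dict String String) (hk : '=' ∉ key) (hv : seen = false → value = [])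
    (hf : l.length < fuel) :
    pvScanB l key value seen d
      = (List.map String.ofList
          (PySem.Chars.splitOn.go [','] fuel l
            ((if seen then key ++ '=' :: value else key).reverse) [])).foldl pvStepA d := by
  induction fuel generalizing l key value seen d with
  | zero => omega
  | succ f ih =>
      cases l with
      | nil =>
          simp [pvScanB, PySem.Chars.splitOn.go, pv_commit_eq d key value seen hk]
      | cons c rest =>
          have hfr : rest.length < f := by simp at hf; omega
          by_cases hc : c = ','
          · subst hc
            have hp : List.isPrefixOf [','] (',' :: rest) = true := by
              simp [List.isPrefixOf]
            rw [PySem.Chars.splitOn.go]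
            simp only [hp, if_true]
            rw [pv_goOn_acc]
            simp only [List.reverse_cons, List.reverse_nil, List.nil_append,
              List.map_cons, List.cons_append, List.foldl_cons]
            rw [List.reverse_reverse, pv_commit_eq d key value seen hk]
            show pvScanB rest [] [] false (pvCommitB d key value seen) = _
            exact ih rest [] [] false (pvCommitB d key value seen)
              (by simp) (fun _ => rfl) hfr
          · have hp : List.isPrefixOf [','] (c :: rest) = false := by
              simp [List.isPrefixOf]; exact fun h => hc h.symm
            rw [PySem.Chars.splitOn.go]
            simp only [hp, Bool.false_eq_true, if_false]
            by_cases he : c = '=' ∧ seen = false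
            · obtain ⟨he1, he2⟩ := he
              subst he1; subst he2
              rw [hv rfl]
              show (if ('=' : Char) = ',' then _ else
                if ('=' : Char) = '=' ∧ (false : Bool) = false then pvScanB rest key [] true d
                else if (false : Bool) = true then _ else _) = _
              rw [if_neg (by decide), if_pos (by exact ⟨rfl, rfl⟩)]
              rw [ih rest key [] true d hk (by simp) hfr]
              simp
            · cases seen with
              | true =>
                  show (if c = ',' then _ else
                    if c = '=' ∧ (true : Bool) = false then _
                    else if (true : Bool) = true then pvScanB rest key (value ++ [c]) true d
                    else _) = _
                  rw [if_neg hc, if_neg (by simp), if_pos rfl]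
                  rw [ih rest key (value ++ [c]) true d hk (by simp) hfr]
                  simp
              | false =>
                  have hce : ¬ c = '=' := fun h => he ⟨h, rfl⟩
                  show (if c = ',' then _ else
                    if c = '=' ∧ (false : Bool) = false then _
                    else if (false : Bool) = true then _
                    else pvScanB rest (key ++ [c]) value false d) = _
                  rw [if_neg hc, if_neg (fun h => hce h.1), if_neg (by decide)]
                  rw [ih rest (key ++ [c]) value false d
                    (by simp; exact ⟨hk, fun h => hce h.symm⟩) hv hfr]
                  rw [hv rfl]
                  simp

-- per-line: B's state machine over the payload = A's fold over the split items
theorem pv_lineB_eq (line : String) :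
    pvParseLineB line
      = match PySem.Str.split? (PySem.Str.slice line (some 7) none) "," with
        | some items => items.foldl pvStepA PySem.Dict.empty
        | none => PySem.Dict.empty := by
  have hsplit : PySem.Str.split? (PySem.Str.slice line (some 7) none) ","
      = some (List.map String.ofList
          (PySem.Chars.splitOn (PySem.Str.slice line (some 7) none).toList [','])) := by
    simp [PySem.Str.split?, PySem.Chars.split?]
  rw [hsplit]
  unfold pvParseLineB
  rw [pv_scanB_eq ((PySem.Str.slice line (some 7) none).toList.length + 1)
    _ [] [] false PySem.Dict.empty (by simp) (fun _ => rfl) (by omega)]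
  rfl

-- ===== VERDICT (by name: the statement is the Claim_ definition above) =====
theorem parse_status_fields_spec : Claim_equal_parse_status_fields := by
  intro responses _
  show parse_status_fields responses = parse_status_fields_alt responses
  unfold parse_status_fields parse_status_fields_alt
  rw [pv_foldl_lastB, pv_scanA_eq]
  cases hf : responses.reverse.find? (fun line => PySem.Str.startswith line "STATUS:") with
  | none => rfl
  | some target =>
      show pvParseLineA target = (pvParseLineB target).items
      rw [pv_lineB_eq]
      unfold pvParseLineA
      cases PySem.Str.split? (PySem.Str.slice target (some 7) none) "," <;> rfl
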